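-- pv_equiv track=rewrite | github.com/SeisSol/PSpaMM | scripts/max_knl.py | getBlocksize
-- ===== SOURCE A (Python) =====
-- def getBlocksize(m , n):
--
-- 	bm = 8
-- 	bn = 1
-- 	maxval = 0
--
-- 	for i in range(8, m+1, 8):
-- 		for j in range(1, n+1):
-- 			if KNL_condition(i, j):
-- 				if i*j > maxval:
-- 					maxval = i*j
-- 					bm = i
-- 					bn = j
--
-- 	return (bm, bn)
--
-- def KNL_condition(bm, bn):
--     return (bn+1) * (bm / 8) <= 32
-- ===== SOURCE B (Python) =====
-- def getBlocksize(m, n):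
--     # For a fixed i, the KNL condition (j+1)*(i/8) <= 32 holds exactly for
--     # j <= 256//i - 1, and i*j grows with j, so the best j for i is
--     # min(n, 256//i - 1); a single while-loop over i suffices.
--     bm, bn, maxval = 8, 1, 0
--     i = 8
--     while i <= m:
--         j = min(n, 256 // i - 1)
--         if j >= 1 and i * j > maxval:
--             bm, bn, maxval = i, j, i * j
--         i += 8
--     return (bm, bn)
-- ===== Notes on version B (the rewrite author's own statement) =====
-- stated objective: faster
-- what changed: B eliminates A's inner scan over all j: for each i the KNL condition is exactly j <= 256//i - 1, so B computes the best j = min(n, 256//i - 1) directly inside a single while-loop over i (ported as a recursion, vs A's nested range-folds).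
import Mathlib
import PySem

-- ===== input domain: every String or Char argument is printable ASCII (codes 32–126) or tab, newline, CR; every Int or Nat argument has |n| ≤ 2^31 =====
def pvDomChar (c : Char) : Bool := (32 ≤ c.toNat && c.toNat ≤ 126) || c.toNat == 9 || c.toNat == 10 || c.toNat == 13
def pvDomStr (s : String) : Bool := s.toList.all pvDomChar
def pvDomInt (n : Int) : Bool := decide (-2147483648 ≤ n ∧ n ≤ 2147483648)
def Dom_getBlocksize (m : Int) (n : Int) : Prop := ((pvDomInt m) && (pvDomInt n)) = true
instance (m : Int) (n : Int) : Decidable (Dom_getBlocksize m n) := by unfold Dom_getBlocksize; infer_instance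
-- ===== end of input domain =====

-- B replaces A's nested scan over all (i, j) by a single while-loop over i with the best j
-- computed directly (j = min(n, 256//i - 1)); objective: faster (O(m) vs O(m*n)).

-- ===== PORT A =====
-- KNL_condition: (bn+1)*(bm/8) <= 32 uses float division, but every call site passes
-- bm a multiple of 8 with |bn|,|bm| ≤ 2^31+1, where the float product compares to 32
-- exactly as the integer product; ported exactly as (bn+1)*bm ≤ 32*8.
def pvKNLCondition (bm : Int) (bn : Int) : Bool := decide ((bn + 1) * bm ≤ 32 * 8)

-- inner 'for j in range(1, n+1)' loop of A
def pvInnerA (n : Int) (i : Int) (st : Int × Int × Int) : Int × Int × Int :=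
  (PySem.List.pyRange 1 (n + 1) 1).foldl
    (fun st j =>
      if pvKNLCondition i j then
        if i * j > st.2.2 then (i, j, i * j) else st
      else st) st

def getBlocksize (m : Int) (n : Int) : List Int :=
  let st := (PySem.List.pyRange 8 (m + 1) 8).foldl
    (fun st i => pvInnerA n i st) ((8 : Int), (1 : Int), (0 : Int))
  [st.1, st.2.1]

-- ===== PORT B =====
-- B's 'while i <= m' loop, as structural recursion on the remaining distance to m
def pvBestB (m : Int) (n : Int) (i : Int) (st : Int × Int × Int) : Int × Int × Int :=
  if i ≤ m then
    let j := min n (PySem.Int.floordiv 256 i - 1)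
    pvBestB m n (i + 8)
      (if 1 ≤ j ∧ i * j > st.2.2 then (i, j, i * j) else st)
  else st
termination_by (m + 1 - i).toNat
decreasing_by omega

def getBlocksize_alt (m : Int) (n : Int) : List Int :=
  let st := pvBestB m n 8 ((8 : Int), (1 : Int), (0 : Int))
  [st.1, st.2.1]

-- ===== PRECONDITION & SPEC =====
def Spec_getBlocksize (m : Int) (n : Int) (out : List Int) : Prop := out = getBlocksize_alt m n
instance (m : Int) (n : Int) (out : List Int) : Decidable (Spec_getBlocksize m n out) := by unfold Spec_getBlocksize; infer_instance

-- ===== CLAIM (what is proved, stated in full; the proofs are below) =====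
def Claim_equal_getBlocksize : Prop := ∀ (m : Int) (n : Int), Dom_getBlocksize m n → Spec_getBlocksize m n (getBlocksize m n)

-- ===== LEMMAS AND PROOFS =====

-- proof-level view of B's loop body as a fold step
def pvStepB (n : Int) (st : Int × Int × Int) (i : Int) : Int × Int × Int :=
  let j := min n (PySem.Int.floordiv 256 i - 1)
  if 1 ≤ j ∧ i * j > st.2.2 then (i, j, i * j) else st

-- step-8 range: empty and cons cases (PySem only provides these for step 1)
lemma pyRange8_nil (a b : Int) (h : b ≤ a) : PySem.List.pyRange a b 8 = [] := by
  rw [PySem.List.pyRange_of_pos a b (by norm_num)]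
  rw [if_neg (by omega)]
  simp

lemma pyRange8_cons (a b : Int) (h : a < b) :
    PySem.List.pyRange a b 8 = a :: PySem.List.pyRange (a + 8) b 8 := by
  rw [PySem.List.pyRange_of_pos a b (by norm_num),
      PySem.List.pyRange_of_pos (a + 8) b (by norm_num)]
  rcases lt_or_ge (a + 8) b with h8 | h8
  · rw [if_pos h, if_pos h8]
    have hN : ((b - a + 8 - 1) / 8).toNat = ((b - (a + 8) + 8 - 1) / 8).toNat + 1 := by
      omega
    rw [hN, List.range_succ_eq_map]
    simp only [List.map_cons, List.map_map, Nat.cast_zero, mul_zero, add_zero]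
    congr 1
    apply List.map_congr_left
    intro k _
    simp only [Function.comp_apply]
    push_cast
    ring
  · rw [if_pos h, if_neg (by omega)]
    have hN : ((b - a + 8 - 1) / 8).toNat = 1 := by omega
    rw [hN]
    simp

-- B's recursion computes the fold of its step over range(i, m+1, 8)
lemma pvBestB_eq_foldl (m n : Int) : ∀ (i : Int) (st : Int × Int × Int),
    pvBestB m n i st = (PySem.List.pyRange i (m + 1) 8).foldl (pvStepB n) st := by
  have key : ∀ (fuel : Nat) (i : Int) (st : Int × Int × Int), (m + 1 - i).toNat ≤ fuel →
      pvBestB m n i st = (PySem.List.pyRange i (m + 1) 8).foldl (pvStepB n) st := by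
    intro fuel
    induction fuel with
    | zero =>
      intro i st h
      rw [pvBestB, if_neg (by omega), pyRange8_nil _ _ (by omega)]
      rfl
    | succ f ih =>
      intro i st h
      by_cases hi : i ≤ m
      · rw [pvBestB, if_pos hi, pyRange8_cons _ _ (by omega), List.foldl_cons,
            ih (i + 8) _ (by omega)]
        rfl
      · rw [pvBestB, if_neg hi, pyRange8_nil _ _ (by omega)]
        rfl
  exact fun i st => key (m + 1 - i).toNat i st le_rfl

-- A's KNL condition at (i, j) says exactly j ≤ 256//i - 1 (for positive i)
lemma pvCond_iff (i j : Int) (hi : 0 < i) :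
    ((j + 1) * i ≤ 256 ↔ j ≤ PySem.Int.floordiv 256 i - 1) := by
  have h := Int.le_ediv_iff_mul_le (a := j + 1) (b := 256) hi
  simp only [PySem.Int.floordiv, Int.fdiv_eq_ediv]
  omega

-- A's inner j-loop equals B's direct computation of the best j for this i
lemma pvInner_eq (n i : Int) (hi : 0 < i) (st : Int × Int × Int) :
    pvInnerA n i st = pvStepB n st i := by
  rcases le_or_gt n 0 with hn | hn
  · unfold pvInnerA pvStepB
    rw [PySem.List.pyRange_one_eq_nil (by omega)]
    simp only [List.foldl_nil]
    rw [if_neg]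
    intro ⟨h1, _⟩
    have := min_le_left n (PySem.Int.floordiv 256 i - 1)
    omega
  · have key : ∀ N : Int, 0 ≤ N → pvInnerA N i st = pvStepB N st i := by
      intro N hN
      induction N, hN using Int.le_induction with
      | base =>
        unfold pvInnerA pvStepB
        rw [PySem.List.pyRange_one_eq_nil (by omega)]
        simp only [List.foldl_nil]
        rw [if_neg]
        intro ⟨h1, _⟩
        have := min_le_left (0 : Int) (PySem.Int.floordiv 256 i - 1)
        omega
      | succ N hN ih =>
        unfold pvInnerA at ih ⊢
        rw [show N + 1 + 1 = (N + 1) + 1 from rfl,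
            PySem.List.pyRange_one_succ_right (by omega : (1:Int) ≤ N + 1),
            List.foldl_append, ih]
        unfold pvStepB
        simp only [List.foldl_cons, List.foldl_nil, pvKNLCondition, decide_eq_true_eq]
        rw [show (32:Int) * 8 = 256 from by norm_num]
        set d := PySem.Int.floordiv 256 i - 1 with hd
        have hcond := pvCond_iff i (N + 1) hi
        rw [← hd] at hcond
        rcases le_or_gt d N with hdn | hdn
        · have hmin : min (N + 1) d = min N d := by omega
          rw [hmin, if_neg (by omega : ¬ (N + 1 + 1) * i ≤ 256)]
        · have hm1 : min (N + 1) d = N + 1 := by omega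
          have hm0 : min N d = N := by omega
          have hmono : i * N < i * (N + 1) := by nlinarith
          rw [if_pos (by omega : (N + 1 + 1) * i ≤ 256), hm1, hm0]
          by_cases hA : 1 ≤ N ∧ i * N > st.2.2
          · rw [if_pos hA]
            simp only
            rw [if_pos (by omega : i * (N + 1) > i * N),
                if_pos (by constructor <;> omega)]
          · rw [if_neg hA]
            by_cases hB : i * (N + 1) > st.2.2
            · rw [if_pos hB, if_pos ⟨by omega, hB⟩]
            · rw [if_neg hB, if_neg (by intro ⟨_, h⟩; exact hB h)]
    exact key n (by omega)

-- ===== VERDICT (by name: the statement is the Claim_ definition above) =====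
theorem getBlocksize_spec : Claim_equal_getBlocksize := by
  intro m n _
  unfold Spec_getBlocksize getBlocksize getBlocksize_alt
  rw [pvBestB_eq_foldl]
  have h := PySem.List.foldl_congr_mem (PySem.List.pyRange 8 (m + 1) 8)
    (fun st i => pvInnerA n i st) (pvStepB n) ((8 : Int), (1 : Int), (0 : Int))
    (by
      intro st i hmem
      have := (PySem.List.mem_pyRange_iff_of_pos (by norm_num : (0:Int) < 8) i).1 hmem
      exact pvInner_eq n i (by omega) st)
  simp only at h ⊢
  rw [h]
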